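-- pv_equiv track=rewrite | github.com/ksayee/programming_assignments | python/CodingExercises/PrintCharactersFrequencyOrderOfOccurence.py | PrintCharactersFrequencyOrderOfOccuernce
-- ===== SOURCE A (Python) =====
-- import collections
--
-- def PrintCharactersFrequencyOrderOfOccuernce(str1):
--
--     dict=collections.Counter(str1)
--
--     fnl_lst=[]
--     for i in range(0,len(str1)):
--         key=str1[i]
--         if key in dict.keys():
--             fnl_lst.append(key)
--             fnl_lst.append(str(dict[key]))
--             del dict[key]
--     return ''.join(fnl_lst)
-- ===== SOURCE B (Python) =====
-- def PrintCharactersFrequencyOrderOfOccuernce(str1):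
--     counts = {}
--     for ch in str1:
--         counts[ch] = counts.get(ch, 0) + 1
--     out = []
--     for ch, cnt in counts.items():
--         out.append(ch + str(cnt))
--     return ''.join(out)
-- ===== Notes on version B (the rewrite author's own statement) =====
-- stated objective: faster
-- what changed: Replaces A's Counter-plus-scan-with-deletion (rebuilding dict.keys() membership per character) by one accumulate pass into an insertion-ordered dict followed by a single emit pass over its items.
import Mathlib
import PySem

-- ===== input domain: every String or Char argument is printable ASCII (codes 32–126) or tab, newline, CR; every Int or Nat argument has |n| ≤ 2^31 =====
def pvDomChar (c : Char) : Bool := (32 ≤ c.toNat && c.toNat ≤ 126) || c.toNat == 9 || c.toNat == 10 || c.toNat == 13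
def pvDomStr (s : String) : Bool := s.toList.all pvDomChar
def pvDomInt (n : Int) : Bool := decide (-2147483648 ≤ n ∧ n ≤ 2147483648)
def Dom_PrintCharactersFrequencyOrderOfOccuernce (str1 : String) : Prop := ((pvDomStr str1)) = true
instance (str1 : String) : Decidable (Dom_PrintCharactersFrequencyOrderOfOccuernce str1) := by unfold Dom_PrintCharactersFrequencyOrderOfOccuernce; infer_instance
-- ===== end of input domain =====

-- B replaces A's Counter-then-index-scan-with-deletion by one accumulate pass into an
-- insertion-ordered count dict followed by one emit pass over its items (objective: faster).

-- ===== PORT A =====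
-- dict = Counter(str1); for i in range(0, len(str1)): if str1[i] in dict.keys(): emit char
-- and str(count), then del dict[key]; ''.join at the end.
def PrintCharactersFrequencyOrderOfOccuernce (str1 : String) : String :=
  let dict := PySem.Dict.counter str1.toList
  let st := (PySem.List.pyRange 0 (PySem.Str.len str1) 1).foldl
      (fun (st : PySem.Dict Char Int × List String) i =>
        let key := PySem.List.pyGetD str1.toList i ' '   -- str1[i]; i ∈ range(len(str1)) so always in range
        if st.1.contains key then
          (st.1.erase key, st.2 ++ [String.ofList [key], PySem.Int.toStr (st.1.getD key 0)])
        else st)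
      (dict, [])
  PySem.Str.join "" st.2

-- ===== PORT B =====
-- one pass building an insertion-ordered count dict, then one pass emitting ch + str(cnt) per item
def PrintCharactersFrequencyOrderOfOccuernce_alt (str1 : String) : String :=
  let counts := str1.toList.foldl
      (fun (d : PySem.Dict Char Int) ch => d.insert ch (d.getD ch 0 + 1)) PySem.Dict.empty
  let out := counts.items.foldl
      (fun (acc : List String) p =>
        -- ch + str(cnt): string concatenation written on code points (exact)
        acc ++ [String.ofList ([p.1] ++ (PySem.Int.toStr p.2).toList)]) []
  PySem.Str.join "" out

-- ===== PRECONDITION & SPEC =====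
def Spec_PrintCharactersFrequencyOrderOfOccuernce (str1 : String) (out : String) : Prop := out = PrintCharactersFrequencyOrderOfOccuernce_alt str1
instance (str1 : String) (out : String) : Decidable (Spec_PrintCharactersFrequencyOrderOfOccuernce str1 out) := by unfold Spec_PrintCharactersFrequencyOrderOfOccuernce; infer_instance

-- ===== CLAIM (what is proved, stated in full; the proofs are below) =====
def Claim_equal_PrintCharactersFrequencyOrderOfOccuernce : Prop := ∀ (str1 : String), Dom_PrintCharactersFrequencyOrderOfOccuernce str1 → Spec_PrintCharactersFrequencyOrderOfOccuernce str1 (PrintCharactersFrequencyOrderOfOccuernce str1)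

-- ===== LEMMAS AND PROOFS =====

theorem pv_any_filter_ne (ps : List (Char × Int)) (k x : Char) :
    ((ps.filter (fun p => !(p.1 == k))).any fun p => p.1 == x)
      = (!(x == k) && ps.any fun p => p.1 == x) := by
  induction ps with
  | nil => simp
  | cons p ps ih =>
    by_cases hx : x = k <;> by_cases hp : p.1 = x <;> by_cases hpk : p.1 = k <;>
      simp_all <;> simp [beq_eq_false_iff_ne.mpr hp]

theorem pv_find_filter_ne (ps : List (Char × Int)) (k x : Char) (h : x ≠ k) :
    List.find? (fun p => p.1 == x) (ps.filter (fun p => !(p.1 == k)))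
      = List.find? (fun p => p.1 == x) ps := by
  induction ps with
  | nil => rfl
  | cons p ps ih =>
    by_cases h1 : p.1 = k <;> by_cases h2 : p.1 = x <;>
      simp_all

-- del dict[key]: membership after deletion
theorem pv_contains_erase (d : PySem.Dict Char Int) (k x : Char) :
    (d.erase k).contains x = (!(x == k) && d.contains x) := by
  rcases d with ⟨items⟩
  simpa [PySem.Dict.erase, PySem.Dict.contains] using pv_any_filter_ne items k x

-- del dict[key]: lookups at other keys are unchanged
theorem pv_getD_erase_of_ne (d : PySem.Dict Char Int) (k x : Char) (v : Int) (h : x ≠ k) :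
    (d.erase k).getD x v = d.getD x v := by
  rcases d with ⟨items⟩
  simp [PySem.Dict.erase, PySem.Dict.getD, PySem.Dict.get?, pv_find_filter_ne items k x h]

-- ''.join on code points is flattening
theorem pv_chars_join_nil_flatten (parts : List (List Char)) :
    PySem.Chars.join [] parts = parts.flatten := by
  induction parts with
  | nil => rfl
  | cons p ps ih =>
    cases ps with
    | nil => simp [PySem.Chars.join, List.intercalate]
    | cons q qs =>
      simp only [PySem.Chars.join, List.intercalate] at *
      simp [List.intersperse] at *
      simp [ih]

-- A's scan characterised: it appends, for each first occurrence of a character still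
-- present in d (in first-occurrence order), the character and d's count for it.
theorem pv_loopA (l : List Char) (d : PySem.Dict Char Int) (acc : List String) :
    (l.foldl
      (fun (st : PySem.Dict Char Int × List String) key =>
        if st.1.contains key then
          (st.1.erase key, st.2 ++ [String.ofList [key], PySem.Int.toStr (st.1.getD key 0)])
        else st)
      (d, acc)).2
    = acc ++ ((PySem.Set.ofList l).filter (fun c => d.contains c)).flatMap
        (fun c => [String.ofList [c], PySem.Int.toStr (d.getD c 0)]) := by
  induction l generalizing d acc with
  | nil => simp [PySem.Set.ofList]
  | cons c rest ih =>
    simp only [List.foldl_cons]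
    by_cases h : d.contains c = true
    · rw [if_pos h, ih]
      rw [PySem.Set.ofList_cons]
      simp only [PySem.Set.discard, List.filter_filter, List.filter_cons, h, if_pos, pv_contains_erase]
      simp only [List.flatMap_cons, List.append_assoc]
      congr 1
      congr 1
      rw [show (fun a => d.contains a && !(a == c)) = (fun a => !(a == c) && d.contains a) from funext fun a => Bool.and_comm _ _]
      refine List.flatMap_congr ?_
      intro a ha
      have hac : a ≠ c := by
        have := (List.mem_filter.mp ha).2
        simp at this
        exact this.1
      rw [pv_getD_erase_of_ne d c a 0 hac]
    · rw [if_neg h, ih]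
      rw [PySem.Set.ofList_cons]
      simp only [PySem.Set.discard, List.filter_filter, List.filter_cons]
      simp only [Bool.not_eq_true] at h
      rw [if_neg (by simp [h])]
      congr 1
      refine congrArg _ ?_
      refine (List.filter_congr ?_).symm
      intro a ha
      by_cases hac : a = c
      · subst hac; simp [h]
      · simp [beq_eq_false_iff_ne.mpr hac]

-- the two emit shapes flatten to the same character list
theorem pv_emit (l : List Char) (g : Char → Int) :
    (List.map String.toList (l.flatMap fun c => [String.ofList [c], PySem.Int.toStr (g c)])).flatten
    = (List.map String.toList (l.map fun c => String.ofList ([c] ++ (PySem.Int.toStr (g c)).toList))).flatten := by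
  induction l with
  | nil => rfl
  | cons c rest ih => simp [String.toList_ofList, ih]

-- ===== VERDICT (by name: the statement is the Claim_ definition above) =====
theorem PrintCharactersFrequencyOrderOfOccuernce_spec : Claim_equal_PrintCharactersFrequencyOrderOfOccuernce := by
  intro str1 _
  unfold Spec_PrintCharactersFrequencyOrderOfOccuernce
  unfold PrintCharactersFrequencyOrderOfOccuernce PrintCharactersFrequencyOrderOfOccuernce_alt
  simp only []
  rw [PySem.Dict.foldl_insert_getD_add_one_eq_counter]
  rw [PySem.Str.len_eq]
  rw [PySem.List.foldl_pyRange_zero_pyGetD' str1.toList ' '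
      (fun (st : PySem.Dict Char Int × List String) key =>
        if st.1.contains key then
          (st.1.erase key, st.2 ++ [String.ofList [key], PySem.Int.toStr (st.1.getD key 0)])
        else st)
      (PySem.Dict.counter str1.toList, [])]
  rw [pv_loopA]
  rw [PySem.List.foldl_append_singleton_eq_map
      (fun p : Char × Int => String.ofList ([p.1] ++ (PySem.Int.toStr p.2).toList))]
  rw [PySem.Dict.items_counter, List.map_map]
  simp only [PySem.Dict.contains_counter, PySem.Dict.getD_counter, List.nil_append, Function.comp_def]
  have hfilter : List.filter (fun c => str1.toList.contains c) (PySem.Set.ofList str1.toList)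
      = PySem.Set.ofList str1.toList := by
    refine List.filter_eq_self.mpr ?_
    intro a ha
    simpa using (PySem.Set.mem_ofList _ _).mp ha
  rw [hfilter]
  unfold PySem.Str.join
  simp only [String.toList_empty]
  rw [pv_chars_join_nil_flatten, pv_chars_join_nil_flatten]
  exact congrArg String.ofList (pv_emit (PySem.Set.ofList str1.toList) (fun c => (str1.toList.count c : Int)))
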